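-- pv_equiv track=rewrite | github.com/Melat369/A2SV-Progress-Sheet-Questions | B_Genome.py | decode_genome
-- ===== SOURCE A (Python) =====
-- def decode_genome(n, s):
--     # Count occurrences of each nucleotide
--     counts = {'A': 0, 'C': 0, 'G': 0, 'T': 0, '?': 0}
--     for char in s:
--         counts[char] += 1
--
--     # Calculate the maximum number of occurrences for each nucleotide
--     max_count = max(counts[nuc] for nuc in 'ACGT')
--
--     # If the count of any nucleotide exceeds the maximum possible count, it's not possible to decode the genome
--     for nuc in 'ACGT':
--         if counts[nuc] > max_count + counts['?']:
--             return "==="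
--
--     # Fill in the question marks with the nucleotide that is needed to balance the counts
--     decoded_genome = []
--     for char in s:
--         if char == '?':
--             for nuc in 'ACGT':
--                 if counts[nuc] < max_count:
--                     decoded_genome.append(nuc)
--                     counts[nuc] += 1
--                     break
--             else:
--                 return "==="  # No nucleotide can balance the counts, return "===".
--         else:
--             decoded_genome.append(char)
--
--     return ''.join(decoded_genome)
-- ===== SOURCE B (Python) =====
-- def decode_genome(n, s):
--     # Count nucleotides once, build the whole replacement queue up front,
--     # then walk s a single time consuming the queue with a pointer.
--     counts = {nuc: s.count(nuc) for nuc in 'ACGT'}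
--     mc = max(counts.values())
--     fills = []
--     for nuc in 'ACGT':
--         fills.extend(nuc * (mc - counts[nuc]))
--     out = []
--     i = 0
--     for ch in s:
--         if ch == '?':
--             if i == len(fills):
--                 return "==="
--             out.append(fills[i])
--             i += 1
--         else:
--             out.append(ch)
--     return ''.join(out)
-- ===== Notes on version B (the rewrite author's own statement) =====
-- stated objective: alternative
-- what changed: B precomputes each nucleotide's deficit once and builds the whole fill queue up front, then walks s a single time consuming the queue with a pointer, instead of A's per-'?' inner scan over 'ACGT' against a mutating counts dict; A's dead feasibility check is dropped.
import Mathlib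
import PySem

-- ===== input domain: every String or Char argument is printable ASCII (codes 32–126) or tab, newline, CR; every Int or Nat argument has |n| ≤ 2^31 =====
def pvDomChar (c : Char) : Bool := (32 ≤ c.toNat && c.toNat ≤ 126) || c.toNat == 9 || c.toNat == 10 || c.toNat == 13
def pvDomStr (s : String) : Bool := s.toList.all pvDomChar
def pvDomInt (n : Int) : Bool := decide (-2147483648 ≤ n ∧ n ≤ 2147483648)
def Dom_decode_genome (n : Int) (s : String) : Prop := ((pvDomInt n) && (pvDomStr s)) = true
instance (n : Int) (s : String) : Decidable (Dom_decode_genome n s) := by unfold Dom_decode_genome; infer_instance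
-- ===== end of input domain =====

-- B replaces A's per-'?' inner scan over 'ACGT' by a precomputed fill queue consumed
-- with a pointer (alternative decomposition, same result).

-- ===== PORT A =====
-- counts dict; counts[char] += 1 ported with Dict.modify (KeyError inputs are excluded by Pre_)
def aCounts (cs : List Char) : PySem.Dict Char Int :=
  cs.foldl (fun d c => d.modify c 0 (· + 1))
    (PySem.Dict.ofList [('A',0),('C',0),('G',0),('T',0),('?',0)])

-- the second for-loop of A: state = counts dict + accumulator; none = the inner for-else "==="
def aLoop (mc : Int) : List Char → PySem.Dict Char Int → List Char → Option (List Char)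
  | [], _, acc => some acc
  | c :: rest, d, acc =>
    if c = '?' then
      match (['A','C','G','T'] : List Char).find? (fun nuc => decide (d.getD nuc 0 < mc)) with
      | some nuc => aLoop mc rest (d.insert nuc (d.getD nuc 0 + 1)) (acc ++ [nuc])
      | none => none
    else aLoop mc rest d (acc ++ [c])

def decode_genome (n : Int) (s : String) : String :=
  let cs := s.toList
  let counts := aCounts cs
  let mc := (PySem.List.max? ((['A','C','G','T'] : List Char).map (fun nuc => counts.getD nuc 0)) (fun y => y)).getD 0
  if (['A','C','G','T'] : List Char).any (fun nuc => decide (counts.getD nuc 0 > mc + counts.getD '?' 0)) then "==="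
  else
    match aLoop mc cs counts [] with
    | some out => String.ofList out
    | none => "==="

-- ===== PORT B =====
-- B's walk over s with the fill queue: at '?', take the next queued nucleotide or fail
def bLoop : List Char → List Char → List Char → Option (List Char)
  | [], _, acc => some acc
  | c :: rest, fills, acc =>
    if c = '?' then
      match fills with
      | [] => none
      | f :: fs => bLoop rest fs (acc ++ [f])
    else bLoop rest fills (acc ++ [c])

def decode_genome_alt (n : Int) (s : String) : String :=
  let cs := s.toList
  let cA : Int := cs.count 'A'
  let cC : Int := cs.count 'C'
  let cG : Int := cs.count 'G'
  let cT : Int := cs.count 'T'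
  let mc := (PySem.List.max? [cA, cC, cG, cT] (fun y => y)).getD 0
  let fills := List.replicate (mc - cA).toNat 'A' ++ List.replicate (mc - cC).toNat 'C'
            ++ List.replicate (mc - cG).toNat 'G' ++ List.replicate (mc - cT).toNat 'T'
  match bLoop cs fills [] with
  | some out => String.ofList out
  | none => "==="

-- ===== PRECONDITION & SPEC =====
-- Pre_ excludes exactly the strings with a character outside 'ACGT?': on those the Python A
-- raises KeyError in its counting loop.
def Pre_decode_genome (n : Int) (s : String) : Prop :=
  s.toList.all (fun c => c ∈ (['A','C','G','T','?'] : List Char)) = true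
instance (n : Int) (s : String) : Decidable (Pre_decode_genome n s) := by unfold Pre_decode_genome; infer_instance

def pvWitness_decode_genome : Int × String := (3, "A?C")

def Spec_decode_genome (n : Int) (s : String) (out : String) : Prop := out = decode_genome_alt n s
instance (n : Int) (s : String) (out : String) : Decidable (Spec_decode_genome n s out) := by unfold Spec_decode_genome; infer_instance

-- ===== CLAIM (what is proved, stated in full; the proofs are below) =====
def Claim_equal_decode_genome : Prop := ∀ (n : Int) (s : String), Dom_decode_genome n s → Pre_decode_genome n s → Spec_decode_genome n s (decode_genome n s)

-- ===== LEMMAS AND PROOFS =====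

theorem getD_aCounts (cs : List Char) (c : Char) :
    (aCounts cs).getD c 0
      = (PySem.Dict.ofList [('A',0),('C',0),('G',0),('T',0),('?',0)]).getD c 0 + (cs.count c : Int) := by
  unfold aCounts
  rw [PySem.Dict.getD_foldl_modify_add_one]

-- B's fill queue expressed as a function of the four running counts
def pvQueue (mc a c g t : Int) : List Char :=
  List.replicate (mc - a).toNat 'A' ++ List.replicate (mc - c).toNat 'C'
    ++ List.replicate (mc - g).toNat 'G' ++ List.replicate (mc - t).toNat 'T'

theorem loop_eq (mc : Int) (rest : List Char) (d : PySem.Dict Char Int) (acc : List Char)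
    (hA : d.getD 'A' 0 ≤ mc) (hC : d.getD 'C' 0 ≤ mc)
    (hG : d.getD 'G' 0 ≤ mc) (hT : d.getD 'T' 0 ≤ mc) :
    aLoop mc rest d acc
      = bLoop rest (pvQueue mc (d.getD 'A' 0) (d.getD 'C' 0) (d.getD 'G' 0) (d.getD 'T' 0)) acc := by
  induction rest generalizing d acc with
  | nil => rfl
  | cons c rest ih =>
    by_cases hq : c = '?'
    · subst hq
      by_cases h1 : d.getD 'A' 0 < mc
      · have hrep : (mc - d.getD 'A' 0).toNat = (mc - (d.getD 'A' 0 + 1)).toNat + 1 := by omega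
        simp only [aLoop, bLoop, List.find?, h1, decide_true, if_true, pvQueue, hrep,
          List.replicate_succ, List.cons_append, if_pos rfl]
        rw [ih (d.insert 'A' (d.getD 'A' 0 + 1)) (acc ++ ['A'])
            (by simp [PySem.Dict.getD_insert]; omega)
            (by simp [PySem.Dict.getD_insert]; omega)
            (by simp [PySem.Dict.getD_insert]; omega)
            (by simp [PySem.Dict.getD_insert]; omega)]
        simp [pvQueue, PySem.Dict.getD_insert]
      · by_cases h2 : d.getD 'C' 0 < mc
        · have e1 : (mc - d.getD 'A' 0).toNat = 0 := by omega
          have hrep : (mc - d.getD 'C' 0).toNat = (mc - (d.getD 'C' 0 + 1)).toNat + 1 := by omega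
          simp only [aLoop, bLoop, List.find?, h1, h2, decide_true, decide_false, if_true,
            pvQueue, e1, hrep, List.replicate_succ, List.replicate_zero, List.nil_append,
            List.cons_append, if_pos rfl]
          rw [ih (d.insert 'C' (d.getD 'C' 0 + 1)) (acc ++ ['C'])
              (by simp [PySem.Dict.getD_insert]; omega)
              (by simp [PySem.Dict.getD_insert]; omega)
              (by simp [PySem.Dict.getD_insert]; omega)
              (by simp [PySem.Dict.getD_insert]; omega)]
          simp [pvQueue, PySem.Dict.getD_insert, e1]
        · by_cases h3 : d.getD 'G' 0 < mc
          · have e1 : (mc - d.getD 'A' 0).toNat = 0 := by omega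
            have e2 : (mc - d.getD 'C' 0).toNat = 0 := by omega
            have hrep : (mc - d.getD 'G' 0).toNat = (mc - (d.getD 'G' 0 + 1)).toNat + 1 := by omega
            simp only [aLoop, bLoop, List.find?, h1, h2, h3, decide_true, decide_false, if_true,
              pvQueue, e1, e2, hrep, List.replicate_succ, List.replicate_zero, List.nil_append,
              List.cons_append, if_pos rfl]
            rw [ih (d.insert 'G' (d.getD 'G' 0 + 1)) (acc ++ ['G'])
                (by simp [PySem.Dict.getD_insert]; omega)
                (by simp [PySem.Dict.getD_insert]; omega)
                (by simp [PySem.Dict.getD_insert]; omega)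
                (by simp [PySem.Dict.getD_insert]; omega)]
            simp [pvQueue, PySem.Dict.getD_insert, e1, e2]
          · by_cases h4 : d.getD 'T' 0 < mc
            · have e1 : (mc - d.getD 'A' 0).toNat = 0 := by omega
              have e2 : (mc - d.getD 'C' 0).toNat = 0 := by omega
              have e3 : (mc - d.getD 'G' 0).toNat = 0 := by omega
              have hrep : (mc - d.getD 'T' 0).toNat = (mc - (d.getD 'T' 0 + 1)).toNat + 1 := by omega
              simp only [aLoop, bLoop, List.find?, h1, h2, h3, h4, decide_true, decide_false,
                if_true, pvQueue, e1, e2, e3, hrep, List.replicate_succ, List.replicate_zero,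
                List.nil_append, List.cons_append, if_pos rfl]
              rw [ih (d.insert 'T' (d.getD 'T' 0 + 1)) (acc ++ ['T'])
                  (by simp [PySem.Dict.getD_insert]; omega)
                  (by simp [PySem.Dict.getD_insert]; omega)
                  (by simp [PySem.Dict.getD_insert]; omega)
                  (by simp [PySem.Dict.getD_insert]; omega)]
              simp [pvQueue, PySem.Dict.getD_insert, e1, e2, e3]
            · have e1 : (mc - d.getD 'A' 0).toNat = 0 := by omega
              have e2 : (mc - d.getD 'C' 0).toNat = 0 := by omega
              have e3 : (mc - d.getD 'G' 0).toNat = 0 := by omega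
              have e4 : (mc - d.getD 'T' 0).toNat = 0 := by omega
              simp [aLoop, bLoop, List.find?, h1, h2, h3, h4, pvQueue, e1, e2, e3, e4]
    · simp only [aLoop, bLoop, if_neg hq]
      exact ih d (acc ++ [c]) hA hC hG hT

-- ===== VERDICT (by name: the statement is the Claim_ definition above) =====
theorem decode_genome_spec : Claim_equal_decode_genome := by
  intro n s _hdom _hpre
  unfold Spec_decode_genome decode_genome decode_genome_alt
  set cs := s.toList with hcs
  have gA := getD_aCounts cs 'A'
  have gC := getD_aCounts cs 'C'
  have gG := getD_aCounts cs 'G'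
  have gT := getD_aCounts cs 'T'
  have gQ := getD_aCounts cs '?'
  have bA : (PySem.Dict.ofList [('A',(0:Int)),('C',0),('G',0),('T',0),('?',0)]).getD 'A' 0 = 0 := by decide
  have bC : (PySem.Dict.ofList [('A',(0:Int)),('C',0),('G',0),('T',0),('?',0)]).getD 'C' 0 = 0 := by decide
  have bG : (PySem.Dict.ofList [('A',(0:Int)),('C',0),('G',0),('T',0),('?',0)]).getD 'G' 0 = 0 := by decide
  have bT : (PySem.Dict.ofList [('A',(0:Int)),('C',0),('G',0),('T',0),('?',0)]).getD 'T' 0 = 0 := by decide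
  have bQ : (PySem.Dict.ofList [('A',(0:Int)),('C',0),('G',0),('T',0),('?',0)]).getD '?' 0 = 0 := by decide
  rw [bA] at gA; rw [bC] at gC; rw [bG] at gG; rw [bT] at gT; rw [bQ] at gQ
  simp only [zero_add] at gA gC gG gT gQ
  -- the shared maximum
  simp only [List.map_cons, List.map_nil, gA, gC, gG, gT]
  rw [PySem.List.max?_id_cons]
  set mc := ([(cs.count 'C' : Int), (cs.count 'G' : Int), (cs.count 'T' : Int)].foldl max (cs.count 'A' : Int)) with hmc
  have hmax := PySem.List.le_foldl_max [(cs.count 'C' : Int), (cs.count 'G' : Int), (cs.count 'T' : Int)] (cs.count 'A' : Int)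
  have hA : (cs.count 'A' : Int) ≤ mc := hmax.1
  have hC : (cs.count 'C' : Int) ≤ mc := hmax.2 _ (by simp)
  have hG : (cs.count 'G' : Int) ≤ mc := hmax.2 _ (by simp)
  have hT : (cs.count 'T' : Int) ≤ mc := hmax.2 _ (by simp)
  -- the feasibility check never fires
  have hany : (['A','C','G','T'] : List Char).any
      (fun nuc => decide ((aCounts cs).getD nuc 0 > (Option.getD (some mc) 0) + (aCounts cs).getD '?' 0)) = false := by
    simp only [List.any_cons, List.any_nil, gA, gC, gG, gT, gQ, Option.getD_some,
      Bool.or_eq_false_iff, decide_eq_false_iff_not, not_lt]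
    have : (0:Int) ≤ (cs.count '?' : Int) := Int.natCast_nonneg _
    refine ⟨by omega, by omega, by omega, by omega, trivial⟩
  rw [hany]
  simp only [Bool.false_eq_true, if_false, Option.getD_some]
  rw [loop_eq mc cs (aCounts cs) [] (by omega) (by omega) (by omega) (by omega)]
  simp only [gA, gC, gG, gT, pvQueue]
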